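-- pv_equiv track=rewrite | github.com/HoodStar1/PrepaC | app/packing_core.py | _parse_mediainfo_sections
-- ===== SOURCE A (Python) =====
-- def _parse_mediainfo_sections(raw_text):
--     sections = []
--     current_name = None
--     current_data = []
--     for line in (raw_text or "").splitlines():
--         stripped = line.strip()
--         if stripped in {"General", "Video", "Audio", "Menu"} or stripped.startswith("Text"):
--             if current_name:
--                 sections.append((current_name, current_data))
--             current_name = stripped
--             current_data = []
--             continue
--         if current_name:
--             current_data.append(line.rstrip())
--     if current_name:
--         sections.append((current_name, current_data))
--     return sections
-- ===== SOURCE B (Python) =====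
-- def _parse_mediainfo_sections(raw_text):
--     lines = (raw_text or "").splitlines()
--     headers = []
--     for i, line in enumerate(lines):
--         s = line.strip()
--         if s in {"General", "Video", "Audio", "Menu"} or s.startswith("Text"):
--             headers.append((i, s))
--     bounds = [i for i, _ in headers[1:]] + [len(lines)]
--     return [(name, [l.rstrip() for l in lines[start + 1:end]])
--             for (start, name), end in zip(headers, bounds)]
-- ===== Notes on version B (the rewrite author's own statement) =====
-- stated objective: alternative
-- what changed: B replaces A's stateful single accumulator loop (current section name/data threaded through every line) by a two-phase plan: first collect the indices of all header lines, then cut each section body out of the line list by slicing between consecutive header indices.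
import Mathlib
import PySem

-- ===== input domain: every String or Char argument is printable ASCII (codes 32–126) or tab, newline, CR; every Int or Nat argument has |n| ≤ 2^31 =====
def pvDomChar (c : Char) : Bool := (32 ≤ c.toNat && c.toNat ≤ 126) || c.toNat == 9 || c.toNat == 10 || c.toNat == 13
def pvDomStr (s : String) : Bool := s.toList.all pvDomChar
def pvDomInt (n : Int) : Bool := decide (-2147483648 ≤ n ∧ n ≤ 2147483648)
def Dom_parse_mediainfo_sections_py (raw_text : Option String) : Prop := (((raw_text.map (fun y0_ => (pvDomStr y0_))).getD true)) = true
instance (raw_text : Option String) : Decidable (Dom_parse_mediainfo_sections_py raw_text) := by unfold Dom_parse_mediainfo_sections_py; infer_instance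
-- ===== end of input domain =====

-- B parses in two phases (locate all header lines, then slice each body out between
-- consecutive headers) instead of A's single stateful accumulator loop; same cost.


-- ===== PORT A =====
-- the header test both Pythons spell out:
-- `stripped in {"General","Video","Audio","Menu"} or stripped.startswith("Text")`
def pvHdr (s : String) : Bool :=
  s == "General" || s == "Video" || s == "Audio" || s == "Menu" || PySem.Str.startswith s "Text"

-- one iteration of A's for-loop over (sections, current_name, current_data)
def pvStepA (st : List (String × List String) × Option String × List String) (line : String) :
    List (String × List String) × Option String × List String :=
  let stripped := PySem.Str.strip line
  if pvHdr stripped then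
    ((match st.2.1 with
      | some n => if n ≠ "" then st.1 ++ [(n, st.2.2)] else st.1   -- `if current_name:` truthiness
      | none => st.1), some stripped, ([] : List String))
  else
    match st.2.1 with
    | some n => if n ≠ "" then (st.1, st.2.1, st.2.2 ++ [PySem.Str.rstrip line]) else st
    | none => st

-- A's trailing `if current_name: sections.append(...)`
def pvFinishA (st : List (String × List String) × Option String × List String) :
    List (String × List String) :=
  match st.2.1 with
  | some n => if n ≠ "" then st.1 ++ [(n, st.2.2)] else st.1
  | none => st.1

def parse_mediainfo_sections_py (raw_text : Option String) : List (String × List String) :=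
  pvFinishA ((PySem.Str.splitlines (raw_text.getD "")).foldl pvStepA ([], none, []))

-- ===== PORT B =====
-- phase 1 of Source B: `for i, line in enumerate(lines): if <header>: headers.append((i, s))`
def pvHdrsB (lines : List String) : List (Int × String) :=
  (PySem.List.enumerate lines 0).filterMap (fun p =>
    let s := PySem.Str.strip p.2
    if pvHdr s then some (p.1, s) else none)

-- phase 2 of Source B: bounds + the slicing comprehension
def pvSectionsB (lines : List String) : List (String × List String) :=
  let headers := pvHdrsB lines
  let bounds : List Int := (headers.drop 1).map Prod.fst ++ [(lines.length : Int)]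
  (headers.zip bounds).map (fun q =>
    (q.1.2, (PySem.List.slice lines (some (q.1.1 + 1)) (some q.2)).map PySem.Str.rstrip))

def parse_mediainfo_sections_py_alt (raw_text : Option String) : List (String × List String) :=
  pvSectionsB (PySem.Str.splitlines (raw_text.getD ""))

-- ===== PRECONDITION & SPEC =====
def Spec_parse_mediainfo_sections_py (raw_text : Option String) (out : List (String × List String)) : Prop := out = parse_mediainfo_sections_py_alt raw_text
instance (raw_text : Option String) (out : List (String × List String)) : Decidable (Spec_parse_mediainfo_sections_py raw_text out) := by unfold Spec_parse_mediainfo_sections_py; infer_instance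

-- ===== CLAIM (what is proved, stated in full; the proofs are below) =====
def Claim_equal_parse_mediainfo_sections_py : Prop := ∀ (raw_text : Option String), Dom_parse_mediainfo_sections_py raw_text → Spec_parse_mediainfo_sections_py raw_text (parse_mediainfo_sections_py raw_text)

-- ===== LEMMAS AND PROOFS =====

-- common reference semantics: a section under construction, and the top-level scan
def pvGo (ls : List String) (s : String) (cd : List String) : List (String × List String) :=
  match ls with
  | [] => [(s, cd)]
  | l :: t =>
    if pvHdr (PySem.Str.strip l) then (s, cd) :: pvGo t (PySem.Str.strip l) []
    else pvGo t s (cd ++ [PySem.Str.rstrip l])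

def pvG0 : List String → List (String × List String)
  | [] => []
  | l :: t => if pvHdr (PySem.Str.strip l) then pvGo t (PySem.Str.strip l) [] else pvG0 t

theorem pvHdr_ne_empty (s : String) (h : pvHdr s = true) : s ≠ "" := by
  intro hs; subst hs; exact absurd h (by decide)

theorem lemA1 (ls : List String) : ∀ (secs : List (String × List String)) (s : String)
    (cd : List String), s ≠ "" →
    pvFinishA (ls.foldl pvStepA (secs, some s, cd)) = secs ++ pvGo ls s cd := by
  induction ls with
  | nil => intro secs s cd h; simp [pvFinishA, pvGo, h]
  | cons l t ih =>
    intro secs s cd h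
    by_cases hl : pvHdr (PySem.Str.strip l) = true
    · simp only [List.foldl_cons, pvStepA, hl, if_pos, h, ne_eq, not_false_iff]
      rw [ih _ _ _ (pvHdr_ne_empty _ hl)]
      simp [pvGo, hl]
    · simp only [List.foldl_cons, pvStepA, hl, if_neg, Bool.false_eq_true, not_false_iff, h,
        ne_eq, if_true]
      rw [ih _ _ _ h]
      simp [pvGo, hl]

theorem lemA0 (ls : List String) :
    pvFinishA (ls.foldl pvStepA ([], none, [])) = pvG0 ls := by
  induction ls with
  | nil => simp [pvFinishA, pvG0]
  | cons l t ih =>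
    by_cases hl : pvHdr (PySem.Str.strip l) = true
    · simp only [List.foldl_cons, pvStepA, hl, if_pos]
      rw [lemA1 _ _ _ _ (pvHdr_ne_empty _ hl)]
      simp [pvG0, hl]
    · simp only [List.foldl_cons, pvStepA, hl, Bool.false_eq_true, if_neg, not_false_iff]
      rw [ih]; simp [pvG0, hl]

-- enumerate with shifted start
def pvHdrsAux (t : List String) (s : Int) : List (Int × String) :=
  (PySem.List.enumerate t s).filterMap (fun p =>
    let s := PySem.Str.strip p.2
    if pvHdr s then some (p.1, s) else none)

theorem pvHdrsAux_shift (t : List String) : ∀ (s : Int),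
    pvHdrsAux t (s + 1) = (pvHdrsAux t s).map (fun p => (p.1 + 1, p.2)) := by
  induction t with
  | nil => intro s; simp [pvHdrsAux, PySem.List.enumerate_nil]
  | cons x t ih =>
    intro s
    simp only [pvHdrsAux, PySem.List.enumerate_cons, List.filterMap_cons]
    by_cases hx : pvHdr (PySem.Str.strip x) = true
    · simp only [hx, if_pos]
      have := ih (s + 1)
      simp only [pvHdrsAux] at this
      simp [this]
    · simp only [hx, Bool.false_eq_true, if_neg, not_false_iff]
      have := ih (s + 1)
      simp only [pvHdrsAux] at this
      simp [this]

theorem pvHdrsB_cons (l : String) (t : List String) :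
    pvHdrsB (l :: t) =
      (if pvHdr (PySem.Str.strip l) then [((0 : Int), PySem.Str.strip l)] else []) ++
        (pvHdrsB t).map (fun p => (p.1 + 1, p.2)) := by
  have h0 : pvHdrsB t = pvHdrsAux t 0 := rfl
  have h1 : pvHdrsB (l :: t) =
      (if pvHdr (PySem.Str.strip l) then [((0 : Int), PySem.Str.strip l)] else []) ++
        pvHdrsAux t 1 := by
    simp only [pvHdrsB, pvHdrsAux, PySem.List.enumerate_cons, List.filterMap_cons]
    by_cases hl : pvHdr (PySem.Str.strip l) = true <;> simp [hl]
  have h2 : pvHdrsAux t 1 = (pvHdrsAux t 0).map (fun p => (p.1 + 1, p.2)) := by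
    have := pvHdrsAux_shift t 0; simpa using this
  rw [h1, h2, h0]

theorem pvHdrsAux_nonneg (t : List String) : ∀ (s : Int) (p : Int × String),
    p ∈ pvHdrsAux t s → s ≤ p.1 := by
  induction t with
  | nil => intro s p hp; simp [pvHdrsAux, PySem.List.enumerate_nil] at hp
  | cons x t ih =>
    intro s p hp
    simp only [pvHdrsAux, PySem.List.enumerate_cons, List.filterMap_cons] at hp
    by_cases hx : pvHdr (PySem.Str.strip x) = true
    · simp only [hx, if_pos, List.mem_cons] at hp
      rcases hp with rfl | hp
      · simp
      · have := ih (s + 1) p hp; omega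
    · simp only [hx, Bool.false_eq_true, if_neg, not_false_iff] at hp
      have := ih (s + 1) p hp; omega

theorem pvHdrsB_nonneg (t : List String) (p : Int × String) (hp : p ∈ pvHdrsB t) : 0 ≤ p.1 :=
  pvHdrsAux_nonneg t 0 p hp

theorem pvSliceShift {α : Type} (x : α) (xs : List α) (a b : Int) (ha : 0 ≤ a) (hb : 0 ≤ b) :
    PySem.List.slice (x :: xs) (some (a + 1)) (some (b + 1)) =
      PySem.List.slice xs (some a) (some b) := by
  rw [PySem.List.slice_toNat (x :: xs) (by omega) (by omega), PySem.List.slice_toNat xs ha hb]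
  have h1 : (a + 1).toNat = a.toNat + 1 := by omega
  have h2 : (b + 1).toNat = b.toNat + 1 := by omega
  have h3 : b.toNat + 1 - (a.toNat + 1) = b.toNat - a.toNat := by omega
  rw [h1, h2, h3, List.drop_succ_cons]

theorem pvRestShift (x : String) (t : List String) :
    ∀ (H : List (Int × String)) (B : List Int),
    (∀ p ∈ H, 0 ≤ p.1) → (∀ b ∈ B, 0 ≤ b) →
    ((H.map (fun p => (p.1 + 1, p.2))).zip (B.map (· + 1))).map (fun q =>
        (q.1.2, (PySem.List.slice (x :: t) (some (q.1.1 + 1)) (some q.2)).map PySem.Str.rstrip))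
      = (H.zip B).map (fun q =>
        (q.1.2, (PySem.List.slice t (some (q.1.1 + 1)) (some q.2)).map PySem.Str.rstrip)) := by
  intro H
  induction H with
  | nil => intro B _ _; simp
  | cons p H ih =>
    intro B hH hB
    cases B with
    | nil => simp
    | cons b B =>
      simp only [List.map_cons, List.zip_cons_cons]
      have hp : 0 ≤ p.1 := hH p (by simp)
      have hb : 0 ≤ b := hB b (by simp)
      rw [pvSliceShift x t (p.1 + 1) b (by omega) hb,
        ih B (fun q hq => hH q (by simp [hq])) (fun c hc => hB c (by simp [hc]))]

theorem pvBoundsB_nonneg (t : List String) (b : Int)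
    (hb : b ∈ ((pvHdrsB t).drop 1).map Prod.fst ++ [(t.length : Int)]) : 0 ≤ b := by
  rcases List.mem_append.1 hb with h | h
  · rcases List.mem_map.1 h with ⟨p, hp, rfl⟩
    exact pvHdrsB_nonneg t p (List.mem_of_mem_drop hp)
  · simp at h; subst h; positivity

-- first-header characterisation: pvHdrsB's head index is where takeWhile stops
theorem pvHdrs_takeWhile (t : List String) :
    (pvHdrsB t = [] ∧ t.takeWhile (fun l => !pvHdr (PySem.Str.strip l)) = t) ∨
    (∃ (k : Nat) (hs : String) (H' : List (Int × String)),
      pvHdrsB t = ((k : Int), hs) :: H' ∧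
      t.takeWhile (fun l => !pvHdr (PySem.Str.strip l)) = t.take k) := by
  induction t with
  | nil => left; constructor <;> rfl
  | cons l t ih =>
    rw [pvHdrsB_cons]
    by_cases hl : pvHdr (PySem.Str.strip l) = true
    · right
      refine ⟨0, PySem.Str.strip l, (pvHdrsB t).map (fun p => (p.1 + 1, p.2)), ?_, ?_⟩
      · simp [hl]
      · simp [hl]
    · rcases ih with ⟨h1, h2⟩ | ⟨k, hs, H', h1, h2⟩
      · left
        constructor
        · simp [hl, h1]
        · simp [hl, h2]
      · right
        refine ⟨k + 1, hs, H'.map (fun p => (p.1 + 1, p.2)), ?_, ?_⟩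
        · simp [hl, h1]
        · simp [hl, h2]

theorem pvGo_eq (t : List String) : ∀ (s : String) (cd : List String),
    pvGo t s cd =
      (s, cd ++ (t.takeWhile (fun l => !pvHdr (PySem.Str.strip l))).map PySem.Str.rstrip) ::
        pvG0 (t.dropWhile (fun l => !pvHdr (PySem.Str.strip l))) := by
  induction t with
  | nil => intro s cd; simp [pvGo, pvG0]
  | cons l t ih =>
    intro s cd
    by_cases hl : pvHdr (PySem.Str.strip l) = true
    · simp [pvGo, hl, pvG0]
    · simp only [pvGo, hl, Bool.false_eq_true, if_neg, not_false_iff, List.takeWhile_cons,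
        List.dropWhile_cons]
      rw [ih]
      simp

theorem pvG0_dropWhile (t : List String) :
    pvG0 (t.dropWhile (fun l => !pvHdr (PySem.Str.strip l))) = pvG0 t := by
  induction t with
  | nil => rfl
  | cons l t ih =>
    by_cases hl : pvHdr (PySem.Str.strip l) = true
    · simp [hl]
    · simp [hl, pvG0, ih]

theorem pvBmain (lines : List String) : pvSectionsB lines = pvG0 lines := by
  induction lines with
  | nil => rfl
  | cons l t ih =>
    simp only [pvSectionsB] at ih ⊢
    rw [pvHdrsB_cons]
    have hlen : ((l :: t).length : Int) = (t.length : Int) + 1 := by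
      push_cast [List.length_cons]; ring
    by_cases hl : pvHdr (PySem.Str.strip l) = true
    · -- l is a header: the first section starts here
      simp only [hl, if_pos, List.singleton_append]
      rcases pvHdrs_takeWhile t with ⟨h1, h2⟩ | ⟨k, hs, H', h1, h2⟩
      · -- no further header: the single section swallows all of t
        rw [h1]
        have hslice : PySem.List.slice (l :: t) (some ((0 : Int) + 1)) (some ((t.length : Int) + 1))
            = t := by
          rw [pvSliceShift l t 0 (t.length : Int) le_rfl (by positivity)]
          rw [PySem.List.slice_toNat t le_rfl (by positivity)]
          simp
        have hdrop : t.dropWhile (fun l => !pvHdr (PySem.Str.strip l)) = [] := by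
          have := List.takeWhile_append_dropWhile (p := fun l => !pvHdr (PySem.Str.strip l)) (l := t)
          rw [h2] at this
          have hlen2 := congrArg List.length this
          simp at hlen2
          simp only [List.dropWhile_eq_nil_iff, Bool.not_eq_eq_eq_not, Bool.not_true]
          exact hlen2
        simp only [List.map_nil, List.drop_succ_cons, List.drop_nil, List.nil_append, hlen,
          List.zip_cons_cons, List.zip_nil_right, List.map_cons, List.map_nil, hslice]
        simp [pvG0, hl, pvGo_eq, h2, hdrop]
      · -- next header at index k of t
        rw [h1]
        simp only [List.drop_succ_cons, List.drop_zero, List.map_cons, List.map_map, hlen]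
        rw [List.cons_append, List.zip_cons_cons, List.map_cons]
        have hB : List.map (Prod.fst ∘ fun p => ((p : Int × String).1 + 1, p.2)) H' ++
              [(t.length : Int) + 1]
            = (H'.map Prod.fst ++ [(t.length : Int)]).map (· + 1) := by
          simp only [List.map_append, List.map_map, List.map_cons, List.map_nil]
          rfl
        have hshift : ((((k : Int)) + 1, hs) :: List.map (fun p => (p.1 + 1, p.2)) H')
            = List.map (fun p => ((p : Int × String).1 + 1, p.2)) (((k : Int), hs) :: H') := rfl
        rw [hshift, hB,
          pvRestShift l t (((k : Int), hs) :: H') (H'.map Prod.fst ++ [(t.length : Int)])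
            (by intro p hp
                have : p ∈ pvHdrsB t := by rw [h1]; exact hp
                exact pvHdrsB_nonneg t p this)
            (by intro b hb
                rcases List.mem_append.1 hb with h | h
                · rcases List.mem_map.1 h with ⟨p, hp, rfl⟩
                  have : p ∈ pvHdrsB t := by rw [h1]; exact List.mem_cons_of_mem _ hp
                  exact pvHdrsB_nonneg t p this
                · simp at h; subst h; positivity)]
        rw [h1] at ih
        rw [List.drop_succ_cons, List.drop_zero] at ih
        rw [ih]
        have hslice0 : PySem.List.slice (l :: t) (some ((0 : Int) + 1)) (some ((k : Int) + 1))
            = t.take k := by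
          rw [pvSliceShift l t 0 (k : Int) le_rfl (by positivity)]
          rw [PySem.List.slice_toNat t le_rfl (by positivity)]
          simp
        rw [hslice0]
        simp [pvG0, hl, pvGo_eq, h2, pvG0_dropWhile]
    · -- l is not a header: it is discarded, everything shifts by one
      simp only [hl, Bool.false_eq_true, if_neg, not_false_iff, List.nil_append]
      have hmap : ((pvHdrsB t).map (fun p => (p.1 + 1, p.2))).drop 1
          = ((pvHdrsB t).drop 1).map (fun p => (p.1 + 1, p.2)) := by
        exact Eq.symm List.map_drop
      have hmap2 : ((((pvHdrsB t).drop 1).map (fun p => (p.1 + 1, p.2))).map Prod.fst ++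
            [((l :: t).length : Int)])
          = (((pvHdrsB t).drop 1).map Prod.fst ++ [(t.length : Int)]).map (· + 1) := by
        simp only [List.map_append, List.map_map, List.map_cons, List.map_nil, hlen]
        rfl
      rw [hmap, hmap2,
        pvRestShift l t (pvHdrsB t) (((pvHdrsB t).drop 1).map Prod.fst ++ [(t.length : Int)])
          (fun p hp => pvHdrsB_nonneg t p hp) (pvBoundsB_nonneg t)]
      rw [ih]
      simp [pvG0, hl]

-- ===== VERDICT (by name: the statement is the Claim_ definition above) =====
theorem parse_mediainfo_sections_py_spec : Claim_equal_parse_mediainfo_sections_py := by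
  intro raw_text _
  unfold Spec_parse_mediainfo_sections_py parse_mediainfo_sections_py parse_mediainfo_sections_py_alt
  rw [lemA0, pvBmain]
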